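-- pv_equiv track=rewrite | github.com/eholle123/advent-of-code-2023 | day1/part2.py | parse_digits
-- ===== SOURCE A (Python) =====
-- from typing import List, Optional
--
-- nums = {
--     "one": 1,
--     "two": 2,
--     "three": 3,
--     "four": 4,
--     "five": 5,
--     "six": 6,
--     "seven": 7,
--     "eight": 8,
--     "nine": 9,
-- }
--
-- def parse_digits(line: str) -> List[int]:
--     digits = []
--     for index in range(len(line)):
--         if digit := try_parse_digit(line[index]):
--             digits.append(digit)
--         else:
--             for number in nums.keys():
--                 if line.startswith(number, index):
--                     digits.append(nums[number])
--     return digits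
--
-- def try_parse_digit(s: str) -> Optional[int]:
--     try:
--         return int(s)
--     except ValueError:
--         return None
-- ===== SOURCE B (Python) =====
-- nums = {
--     "one": 1,
--     "two": 2,
--     "three": 3,
--     "four": 4,
--     "five": 5,
--     "six": 6,
--     "seven": 7,
--     "eight": 8,
--     "nine": 9,
-- }
--
-- def parse_digits(line):
--     # Staged word-major scan: collect every (position, value) hit of each
--     # spelled-out word, then every numeric-digit hit, and read the hits off
--     # in position order.  Positions are unique (no two of the nine words can
--     # match at the same index, and no word starts with a digit), so sorting
--     # by position reproduces A's left-to-right output exactly.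
--     hits = []
--     for word, value in nums.items():
--         for i in range(len(line)):
--             if line.startswith(word, i):
--                 hits.append((i, value))
--     for i, c in enumerate(line):
--         if '1' <= c <= '9':
--             hits.append((i, int(c)))
--     hits.sort(key=lambda h: h[0])
--     return [v for _, v in hits]
-- ===== Notes on version B (the rewrite author's own statement) =====
-- stated objective: alternative
-- what changed: A makes one index-major pass, trying int() via try/except and then all nine words at each position; B is staged and word-major: it collects (position, value) hits per spelled-out word, then digit hits in a separate comparison-guarded pass, sorts the hits by position and reads off the values, relying on the fact that at most one hit exists per position.
import Mathlib
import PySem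

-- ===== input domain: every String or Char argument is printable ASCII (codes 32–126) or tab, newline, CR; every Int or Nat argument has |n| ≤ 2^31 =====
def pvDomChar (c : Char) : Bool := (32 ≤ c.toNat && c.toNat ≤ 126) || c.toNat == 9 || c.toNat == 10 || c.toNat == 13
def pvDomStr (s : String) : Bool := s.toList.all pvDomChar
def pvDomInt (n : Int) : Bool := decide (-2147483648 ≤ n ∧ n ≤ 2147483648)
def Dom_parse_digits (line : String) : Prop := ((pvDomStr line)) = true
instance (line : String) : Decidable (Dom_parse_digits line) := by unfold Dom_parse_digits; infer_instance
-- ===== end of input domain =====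

-- B replaces A's single index-major pass (try int(), else scan all nine words, at each index)
-- by a staged word-major scan: collect (position, value) hits per spelled-out word, then digit
-- hits in a separate pass, sort the hits by position and read off the values
-- (objective: alternative — a different traversal order with a proof that order does not matter).

-- ===== PORT A =====
def pvNums : PySem.Dict String Int :=
  PySem.Dict.ofList
  [("one", 1), ("two", 2), ("three", 3), ("four", 4), ("five", 5),
   ("six", 6), ("seven", 7), ("eight", 8), ("nine", 9)]

def try_parse_digit (s : String) : Option Int := PySem.Int.ofStr? s

-- Python truthiness of an Optional[int]: None and 0 are falsy
def pvTruthy : Option Int → Bool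
  | some d => d != 0
  | none => false

-- the inner `for number in nums.keys(): if line.startswith(number, index): digits.append(nums[number])`
def pvWordScanA (s : List Char) : List Int :=
  pvNums.keys.foldl
    (fun acc w => if w.toList.isPrefixOf s then acc ++ [(pvNums.get? w).getD 0] else acc) []

-- one iteration of A's loop body, at the suffix c :: rest
def pvStepA (c : Char) (rest : List Char) : List Int :=
  let digit := try_parse_digit (String.ofList [c])
  if pvTruthy digit then [digit.getD 0] else pvWordScanA (c :: rest)

-- A's `for index in range(len(line))` with `line[index]` / `line.startswith(w, index)` = recursion on the suffix
def pvParseAGo : List Char → List Int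
  | [] => []
  | c :: rest => pvStepA c rest ++ pvParseAGo rest

def parse_digits (line : String) : List Int := pvParseAGo line.toList

-- ===== PORT B =====
def pvNumsList : List (String × Int) :=
  [("one", 1), ("two", 2), ("three", 3), ("four", 4), ("five", 5),
   ("six", 6), ("seven", 7), ("eight", 8), ("nine", 9)]

-- B's inner `for i in range(len(line)): if line.startswith(word, i): hits.append((i, value))`
def pvWordHits (w : List Char) (v : Int) : List Char → Int → List (Int × Int)
  | [], _ => []
  | s@(_ :: rest), i =>
    (if w.isPrefixOf s then [(i, v)] else []) ++ pvWordHits w v rest (i + 1)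

-- B's `for i, c in enumerate(line): if '1' <= c <= '9': hits.append((i, int(c)))`;
-- int(c) for c in '1'..'9' is ord(c) - 48, exact on that guarded range
def pvDigitHits : List Char → Int → List (Int × Int)
  | [], _ => []
  | c :: rest, i =>
    (if '1' ≤ c ∧ c ≤ '9' then [(i, (c.toNat : Int) - 48)] else []) ++ pvDigitHits rest (i + 1)

def pvHits (cs : List Char) : List (Int × Int) :=
  pvNumsList.foldl (fun acc wv => acc ++ pvWordHits wv.1.toList wv.2 cs 0) [] ++ pvDigitHits cs 0

-- `hits.sort(key=lambda h: h[0])` then `[v for _, v in hits]`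
def parse_digits_alt (line : String) : List Int :=
  (PySem.List.sorted (pvHits line.toList) (fun h => h.1)).map (fun h => h.2)

-- ===== PRECONDITION & SPEC =====
def Spec_parse_digits (line : String) (out : List Int) : Prop := out = parse_digits_alt line
instance (line : String) (out : List Int) : Decidable (Spec_parse_digits line out) := by unfold Spec_parse_digits; infer_instance

-- ===== CLAIM (what is proved, stated in full; the proofs are below) =====
def Claim_equal_parse_digits : Prop := ∀ (line : String), Dom_parse_digits line → Spec_parse_digits line (parse_digits line)

-- ===== LEMMAS AND PROOFS =====

-- the canonical index-ordered hit list: A's per-position events, tagged with their positions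
def pvStep : List Char → List Int
  | [] => []
  | c :: rest => pvStepA c rest

def pvH : List Char → Int → List (Int × Int)
  | [], _ => []
  | c :: rest, i => (pvStepA c rest).map (fun v => (i, v)) ++ pvH rest (i + 1)

theorem map_snd_H (s : List Char) (i : Int) : (pvH s i).map (fun p => p.2) = pvParseAGo s := by
  induction s generalizing i with
  | nil => rfl
  | cons c rest ih => simp [pvH, pvParseAGo, ih]

-- int(c) for a single char with code < 128: the digit's value for '0'..'9', else ValueError
theorem ofChars_single_ascii : ∀ n : Nat, n < 128 →
    PySem.Int.ofChars? [Char.ofNat n] =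
      (if '0' ≤ Char.ofNat n ∧ Char.ofNat n ≤ '9'
       then some (((Char.ofNat n).toNat : Int) - 48) else none) := by
  decide

theorem ofChars_single (c : Char) (h : c.toNat < 128) :
    PySem.Int.ofChars? [c] =
      (if '0' ≤ c ∧ c ≤ '9' then some ((c.toNat : Int) - 48) else none) := by
  have := ofChars_single_ascii c.toNat h
  rwa [Char.ofNat_toNat] at this

theorem char_le_iff {a c : Char} : a ≤ c ↔ a.toNat ≤ c.toNat := by
  rw [Char.le_def, UInt32.le_iff_toNat_le]; rfl

-- A's step in normal form: the digit value on '1'..'9', otherwise the word scan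
theorem stepA_eq (c : Char) (rest : List Char) (h : pvDomChar c = true) :
    pvStepA c rest =
      if '1' ≤ c ∧ c ≤ '9' then [(c.toNat : Int) - 48] else pvWordScanA (c :: rest) := by
  have hlt : c.toNat < 128 := by simp [pvDomChar] at h; omega
  have hof : try_parse_digit (String.ofList [c]) =
      (if '0' ≤ c ∧ c ≤ '9' then some ((c.toNat : Int) - 48) else none) := by
    unfold try_parse_digit
    rw [PySem.Int.ofStr?_ofList]
    exact ofChars_single c hlt
  have e0 : '0'.toNat = 48 := rfl
  have e1 : '1'.toNat = 49 := rfl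
  unfold pvStepA
  by_cases hd : '1' ≤ c ∧ c ≤ '9'
  · have h49 : 49 ≤ c.toNat := by have h1 := hd.1; rw [char_le_iff, e1] at h1; omega
    have h0 : '0' ≤ c ∧ c ≤ '9' := ⟨by rw [char_le_iff, e0]; omega, hd.2⟩
    simp only [hof, if_pos h0, if_pos hd, pvTruthy]
    have hne : ((c.toNat : Int) - 48) ≠ 0 := by omega
    simp [hne]
  · by_cases h0 : '0' ≤ c ∧ c ≤ '9'
    · have h48 : c.toNat = 48 := by
        have b1 := h0.1
        rw [char_le_iff, e0] at b1
        have b2 : ¬ 49 ≤ c.toNat := by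
          intro hx
          exact hd ⟨by rw [char_le_iff, e1]; omega, h0.2⟩
        omega
      simp only [hof, if_pos h0, pvTruthy, if_neg hd]
      have hne : ((c.toNat : Int) - 48) = 0 := by omega
      simp [hne]
    · simp only [hof, if_neg h0, pvTruthy, if_neg hd]
      simp

-- A's word scan is the filtered key list, mapped through the dict lookup
theorem wordScanA_eq (s : List Char) :
    pvWordScanA s =
      ((pvNumsList.map Prod.fst).filter (fun w => w.toList.isPrefixOf s)).map
        (fun w => (pvNums.get? w).getD 0) := by
  have hk : pvNums.keys = pvNumsList.map Prod.fst := by decide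
  unfold pvWordScanA
  rw [hk, PySem.List.foldl_append_if (fun w => w.toList.isPrefixOf s)
        (fun w => (pvNums.get? w).getD 0)]
  simp

theorem lookup_nums : ∀ wv ∈ pvNumsList, (pvNums.get? wv.1).getD 0 = wv.2 := by decide

theorem mem_wordScanA (s : List Char) (v : Int) :
    v ∈ pvWordScanA s ↔ ∃ wv ∈ pvNumsList, wv.1.toList.isPrefixOf s = true ∧ v = wv.2 := by
  rw [wordScanA_eq]
  simp only [List.mem_map, List.mem_filter, List.mem_map]
  constructor
  · rintro ⟨w, ⟨⟨wv, hmem, rfl⟩, hpref⟩, rfl⟩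
    exact ⟨wv, hmem, hpref, lookup_nums wv hmem⟩
  · rintro ⟨wv, hmem, hpref, rfl⟩
    exact ⟨wv.1, ⟨⟨wv, hmem, rfl⟩, hpref⟩, lookup_nums wv hmem⟩

-- no two of the nine words are prefixes of one another
theorem words_not_prefix :
    (pvNumsList.map Prod.fst).Pairwise
      (fun w1 w2 => ¬ w1.toList <+: w2.toList ∧ ¬ w2.toList <+: w1.toList) := by decide

theorem filter_length_le_one {α : Type} (l : List α) (q : α → Bool)
    (h : l.Pairwise (fun a b => ¬(q a = true ∧ q b = true))) :
    (l.filter q).length ≤ 1 := by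
  induction l with
  | nil => simp
  | cons a l ih =>
    rw [List.pairwise_cons] at h
    by_cases ha : q a = true
    · have hempty : l.filter q = [] := by
        rw [List.filter_eq_nil_iff]
        intro b hb hqb
        exact h.1 b hb ⟨ha, hqb⟩
      simp [ha, hempty]
    · simp only [List.filter_cons, if_neg ha]
      exact ih h.2

theorem wordScanA_len (s : List Char) : (pvWordScanA s).length ≤ 1 := by
  rw [wordScanA_eq, List.length_map]
  apply filter_length_le_one
  refine words_not_prefix.imp ?_
  rintro w1 w2 ⟨h12, h21⟩ ⟨p1, p2⟩
  rw [List.isPrefixOf_iff_prefix] at p1 p2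
  rcases List.prefix_or_prefix_of_prefix p1 p2 with h | h
  · exact h12 h
  · exact h21 h

theorem stepA_len (c : Char) (rest : List Char) (h : pvDomChar c = true) :
    (pvStepA c rest).length ≤ 1 := by
  rw [stepA_eq c rest h]
  split
  · simp
  · exact wordScanA_len _

-- no word match starts at a position holding a digit '1'..'9'
theorem word_head_not_digit :
    ∀ wv ∈ pvNumsList, ∀ (c : Char) (r : List Char),
      wv.1.toList.isPrefixOf (c :: r) = true → ¬('1' ≤ c ∧ c ≤ '9') := by
  have hfact : ∀ wv ∈ pvNumsList,
      wv.1.toList ≠ [] ∧ ¬('1' ≤ wv.1.toList.head! ∧ wv.1.toList.head! ≤ '9') := by decide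
  intro wv hmem c r hp hd
  obtain ⟨hne, hh⟩ := hfact wv hmem
  obtain ⟨h0, tl, hw⟩ := List.exists_cons_of_ne_nil hne
  rw [hw, List.isPrefixOf_iff_prefix, List.cons_prefix_iff] at hp
  obtain ⟨l', hl, -⟩ := hp
  injection hl with h1 h2
  subst h1
  apply hh
  rw [hw]
  simpa using hd

-- membership characterisations of the three hit lists
theorem mem_wordHits (w : List Char) (v : Int) (s : List Char) (j : Int) (p : Int × Int) :
    p ∈ pvWordHits w v s j ↔
      ∃ k : Nat, k < s.length ∧ p = (j + (k : Int), v) ∧ w.isPrefixOf (s.drop k) = true := by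
  induction s generalizing j with
  | nil => simp [pvWordHits]
  | cons c rest ih =>
    rw [pvWordHits]
    simp only [List.mem_append, ih]
    constructor
    · rintro (hp | ⟨k, hk, rfl, hpref⟩)
      · refine ⟨0, by simp, ?_, ?_⟩
        · split at hp <;> simp_all
        · split at hp <;> simp_all
      · exact ⟨k + 1, by simpa using hk, by push_cast; ring_nf, by simpa using hpref⟩
    · rintro ⟨k, hk, rfl, hpref⟩
      cases k with
      | zero => left; simp only [List.drop_zero] at hpref; simp [hpref]
      | succ k =>
        right
        exact ⟨k, by simpa using hk, by push_cast; ring_nf, by simpa using hpref⟩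

theorem mem_digitHits (s : List Char) (j : Int) (p : Int × Int) :
    p ∈ pvDigitHits s j ↔
      ∃ (k : Nat) (hk : k < s.length), ('1' ≤ s[k] ∧ s[k] ≤ '9') ∧
        p = (j + (k : Int), ((s[k].toNat : Int) - 48)) := by
  induction s generalizing j with
  | nil => simp [pvDigitHits]
  | cons c rest ih =>
    rw [pvDigitHits]
    simp only [List.mem_append, ih]
    constructor
    · rintro (hp | ⟨k, hk, hd, rfl⟩)
      · refine ⟨0, by simp, ?_, ?_⟩
        · split at hp <;> simp_all
        · split at hp <;> simp_all
      · refine ⟨k + 1, by simpa using hk, by simpa using hd, ?_⟩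
        rw [Prod.ext_iff]
        exact ⟨by push_cast; ring, by simp⟩
    · rintro ⟨k, hk, hd, rfl⟩
      cases k with
      | zero => left; simp at hd; simp [hd]
      | succ k =>
        right
        refine ⟨k, by simpa using hk, by simpa using hd, ?_⟩
        rw [Prod.ext_iff]
        exact ⟨by push_cast; ring, by simp⟩

theorem mem_H (s : List Char) (j : Int) (p : Int × Int) :
    p ∈ pvH s j ↔
      ∃ k : Nat, k < s.length ∧ p.1 = j + (k : Int) ∧ p.2 ∈ pvStep (s.drop k) := by
  induction s generalizing j with
  | nil => simp [pvH]
  | cons c rest ih =>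
    rw [pvH]
    simp only [List.mem_append, ih, List.mem_map]
    constructor
    · rintro (⟨v, hv, rfl⟩ | ⟨k, hk, h1, h2⟩)
      · exact ⟨0, by simp, by simp, by simpa [pvStep] using hv⟩
      · exact ⟨k + 1, by simpa using hk, by rw [h1]; push_cast; ring_nf, by simpa using h2⟩
    · rintro ⟨k, hk, h1, h2⟩
      cases k with
      | zero =>
        left
        exact ⟨p.2, by simpa [pvStep] using h2, by simp [Prod.ext_iff]; omega⟩
      | succ k =>
        right
        exact ⟨k, by simpa using hk, by rw [h1]; push_cast; ring_nf, by simpa using h2⟩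

-- position-pairwise facts, giving Nodup
theorem pairwise_fst_wordHits (w : List Char) (v : Int) (s : List Char) (j : Int) :
    (pvWordHits w v s j).Pairwise (fun a b => a.1 < b.1) := by
  induction s generalizing j with
  | nil => simp [pvWordHits]
  | cons c rest ih =>
    rw [pvWordHits]
    rw [List.pairwise_append]
    refine ⟨?_, ?_, ?_⟩
    · split <;> simp
    · exact ih (j + 1)
    · intro a ha b hb
      have ha1 : a.1 = j := by split at ha <;> simp_all
      have hb1 : j + 1 ≤ b.1 := by
        rw [mem_wordHits] at hb
        obtain ⟨k, -, rfl, -⟩ := hb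
        omega
      omega

theorem pairwise_fst_digitHits (s : List Char) (j : Int) :
    (pvDigitHits s j).Pairwise (fun a b => a.1 < b.1) := by
  induction s generalizing j with
  | nil => simp [pvDigitHits]
  | cons c rest ih =>
    rw [pvDigitHits]
    rw [List.pairwise_append]
    refine ⟨?_, ?_, ?_⟩
    · split <;> simp
    · exact ih (j + 1)
    · intro a ha b hb
      have ha1 : a.1 = j := by split at ha <;> simp_all
      have hb1 : j + 1 ≤ b.1 := by
        rw [mem_digitHits] at hb
        obtain ⟨k, -, -, rfl⟩ := hb
        omega
      omega

theorem pairwise_fst_H (s : List Char) (j : Int) (hdom : s.all pvDomChar = true) :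
    (pvH s j).Pairwise (fun a b => a.1 < b.1) := by
  induction s generalizing j with
  | nil => simp [pvH]
  | cons c rest ih =>
    simp only [List.all_cons, Bool.and_eq_true] at hdom
    rw [pvH]
    rw [List.pairwise_append]
    refine ⟨?_, ?_, ?_⟩
    · have hlen := stepA_len c rest hdom.1
      match hs : pvStepA c rest with
      | [] => simp
      | [x] => simp
      | x :: y :: t => rw [hs] at hlen; simp at hlen
    · exact ih (j + 1) hdom.2
    · intro a ha b hb
      have ha1 : a.1 = j := by
        obtain ⟨v, -, rfl⟩ := List.mem_map.mp ha
        rfl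
      have hb1 : j + 1 ≤ b.1 := by
        rw [mem_H] at hb
        obtain ⟨k, -, h1, -⟩ := hb
        omega
      omega

theorem nodup_of_pairwise_fst {l : List (Int × Int)}
    (h : l.Pairwise (fun a b => a.1 < b.1)) : l.Nodup :=
  h.imp (fun hlt heq => by rw [heq] at hlt; exact lt_irrefl _ hlt)

-- hits as a flatMap, and its membership characterisation
theorem hits_eq (cs : List Char) :
    pvHits cs =
      pvNumsList.flatMap (fun wv => pvWordHits wv.1.toList wv.2 cs 0) ++ pvDigitHits cs 0 := by
  unfold pvHits
  have h := PySem.List.foldl_append_eq_flatMap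
    (fun wv => pvWordHits wv.1.toList wv.2 cs 0) pvNumsList []
  exact congrArg (· ++ pvDigitHits cs 0) (by simpa using h)

theorem values_distinct : pvNumsList.Pairwise (fun a b => a.2 ≠ b.2) := by decide

theorem nodup_flatMap_words (cs : List Char) :
    (pvNumsList.flatMap (fun wv => pvWordHits wv.1.toList wv.2 cs 0)).Nodup := by
  have hgen : ∀ l : List (String × Int), l.Pairwise (fun a b => a.2 ≠ b.2) →
      (l.flatMap (fun wv => pvWordHits wv.1.toList wv.2 cs 0)).Nodup := by
    intro l hl
    induction l with
    | nil => simp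
    | cons a l ih =>
      rw [List.pairwise_cons] at hl
      rw [List.flatMap_cons, List.nodup_append]
      refine ⟨nodup_of_pairwise_fst (pairwise_fst_wordHits _ _ _ _), ih hl.2, ?_⟩
      intro p hp q hq heq
      obtain ⟨k, -, rfl, -⟩ := (mem_wordHits _ _ _ _ _).mp hp
      rw [List.mem_flatMap] at hq
      obtain ⟨wv, hwv, hq⟩ := hq
      obtain ⟨k', -, rfl, -⟩ := (mem_wordHits _ _ _ _ _).mp hq
      have := hl.1 wv hwv
      rw [Prod.ext_iff] at heq
      exact this heq.2
  exact hgen pvNumsList values_distinct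

theorem nodup_hits (cs : List Char) : (pvHits cs).Nodup := by
  rw [hits_eq, List.nodup_append]
  refine ⟨nodup_flatMap_words cs,
          nodup_of_pairwise_fst (pairwise_fst_digitHits _ _), ?_⟩
  intro p hp q hq heq
  rw [List.mem_flatMap] at hp
  obtain ⟨wv, hwv, hp⟩ := hp
  obtain ⟨k, hk, rfl, hpref⟩ := (mem_wordHits _ _ _ _ _).mp hp
  obtain ⟨k', hk', hd, rfl⟩ := (mem_digitHits _ _ _).mp hq
  rw [Prod.ext_iff] at heq
  have hkk : k = k' := by have := heq.1; simpa using this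
  subst hkk
  rw [← List.getElem_cons_drop hk] at hpref
  exact word_head_not_digit wv hwv _ _ hpref hd

-- the hit lists contain the same pairs as the canonical index-ordered list
theorem mem_hits_iff_mem_H (cs : List Char) (hdom : cs.all pvDomChar = true) (p : Int × Int) :
    p ∈ pvHits cs ↔ p ∈ pvH cs 0 := by
  have hdomk : ∀ (k : Nat) (hk : k < cs.length), pvDomChar cs[k] = true := by
    intro k hk
    exact List.all_eq_true.mp hdom _ (cs.getElem_mem hk)
  rw [hits_eq, List.mem_append, List.mem_flatMap, mem_H]
  constructor
  · rintro (⟨wv, hwv, hp⟩ | hp)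
    · obtain ⟨k, hk, rfl, hpref⟩ := (mem_wordHits _ _ _ _ _).mp hp
      refine ⟨k, hk, rfl, ?_⟩
      rw [← List.getElem_cons_drop hk] at hpref ⊢
      have hnd := word_head_not_digit wv hwv _ _ hpref
      rw [pvStep, stepA_eq _ _ (hdomk k hk), if_neg hnd, mem_wordScanA]
      exact ⟨wv, hwv, hpref, rfl⟩
    · obtain ⟨k, hk, hd, rfl⟩ := (mem_digitHits _ _ _).mp hp
      refine ⟨k, hk, rfl, ?_⟩
      rw [← List.getElem_cons_drop hk, pvStep, stepA_eq _ _ (hdomk k hk), if_pos hd]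
      simp
  · rintro ⟨k, hk, h1, h2⟩
    rw [← List.getElem_cons_drop hk, pvStep, stepA_eq _ _ (hdomk k hk)] at h2
    by_cases hd : '1' ≤ cs[k] ∧ cs[k] ≤ '9'
    · rw [if_pos hd] at h2
      simp only [List.mem_singleton] at h2
      right
      rw [mem_digitHits]
      exact ⟨k, hk, hd, by rw [Prod.ext_iff]; exact ⟨by omega, h2⟩⟩
    · rw [if_neg hd, mem_wordScanA] at h2
      obtain ⟨wv, hwv, hpref, hv⟩ := h2
      left
      refine ⟨wv, hwv, (mem_wordHits _ _ _ _ _).mpr ⟨k, hk, ?_, ?_⟩⟩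
      · rw [Prod.ext_iff]; exact ⟨by omega, hv⟩
      · rw [← List.getElem_cons_drop hk]; exact hpref

-- ===== VERDICT (by name: the statement is the Claim_ definition above) =====
theorem parse_digits_spec : Claim_equal_parse_digits := by
  intro line hdom
  unfold Spec_parse_digits parse_digits parse_digits_alt
  have hdom' : line.toList.all pvDomChar = true := hdom
  have hperm : (pvH line.toList 0).Perm (pvHits line.toList) :=
    (List.perm_ext_iff_of_nodup
      (nodup_of_pairwise_fst (pairwise_fst_H _ _ hdom'))
      (nodup_hits _)).mpr
      (fun p => (mem_hits_iff_mem_H _ hdom' p).symm)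
  rw [PySem.List.sorted_eq_of_perm_of_pairwise_lt _ _ _ hperm (pairwise_fst_H _ _ hdom'),
      map_snd_H]
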